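-- pv_equiv track=rewrite | github.com/aosid/prog | euler/project euler 28.py | new_ring
-- ===== SOURCE A (Python) =====
-- def new_ring(g):
--     value = g[0][-1] + 1
--
--     grid=[]
--     for row in g:
--         grid.append([])
--         for val in row:
--             grid[-1].append(val)
--
--     grid.insert(0,[])
--     grid.append([])
--
--     for row in range(1,len(grid)):
--         grid[row].append(value)
--         value += 1
--
--     for i in range(len(grid) - 2):
--         grid[-1].insert(0,value)
--         value += 1
--
--     for row in range(len(grid)-1,-1,-1):
--         grid[row].insert(0,value)
--         value += 1
--
--     for i in range(len(grid) - 1):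
--         grid[0].append(value)
--         value += 1
--
--     return grid
-- ===== SOURCE B (Python) =====
-- def new_ring(g):
--     v = g[0][-1] + 1
--     n = len(g)
--     top = list(range(v + 3*n + 2, v + 4*n + 4))
--     bottom = list(range(v + 2*n + 1, v + n - 1, -1))
--     mid = [[v + 3*n + 1 - i] + list(row) + [v + i] for i, row in enumerate(g)]
--     return [top] + mid + [bottom]
-- ===== Notes on version B (the rewrite author's own statement) =====
-- stated objective: simpler
-- what changed: B replaces A's mutable grid with four in-place insert/append loops by direct construction: arithmetic range() sequences for the new top and bottom rows and a single comprehension gluing left/right border values onto copies of the old rows.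
-- outside the precondition, e.g. on new_ring([]): A raises IndexError, B raises IndexError; on new_ring([[]]): A raises IndexError, B raises IndexError
import Mathlib
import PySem

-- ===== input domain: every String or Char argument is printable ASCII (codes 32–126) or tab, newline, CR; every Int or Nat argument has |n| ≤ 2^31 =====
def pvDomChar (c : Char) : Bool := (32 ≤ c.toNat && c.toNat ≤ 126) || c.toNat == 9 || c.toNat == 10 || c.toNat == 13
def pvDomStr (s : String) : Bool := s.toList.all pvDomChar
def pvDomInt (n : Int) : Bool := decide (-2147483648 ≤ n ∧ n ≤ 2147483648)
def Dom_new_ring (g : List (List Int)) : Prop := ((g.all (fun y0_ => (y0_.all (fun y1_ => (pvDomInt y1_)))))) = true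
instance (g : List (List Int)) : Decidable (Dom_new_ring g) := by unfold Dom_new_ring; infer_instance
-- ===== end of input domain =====

-- B builds the ring by direct construction (range sequences + one comprehension) instead of A's
-- four in-place insert/append loops on a mutable grid; objective: simpler. A does not mutate g.

-- ===== PORT A =====
def new_ring (g : List (List Int)) : List (List Int) :=
  -- value = g[0][-1] + 1  (g[0][-1] exists under Pre_; .getD 0 is never the raising case there)
  let value : Int := (PySem.List.pyGet? ((PySem.List.pyGet? g 0).getD []) (-1)).getD 0 + 1
  -- copy loop: grid.append([]); for val in row: grid[-1].append(val)
  let grid : List (List Int) := g.foldl (fun grid row =>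
      row.foldl (fun grid val => grid.modify (grid.length - 1) (fun r => r ++ [val]))
        (grid ++ [[]])) []
  let grid := [] :: grid          -- grid.insert(0, [])
  let grid := grid ++ [[]]        -- grid.append([])
  -- for row in range(1, len(grid)): grid[row].append(value)
  let st := (PySem.List.pyRange 1 (grid.length : Int) 1).foldl
      (fun st row => (st.1.modify row.toNat (fun r => r ++ [st.2]), st.2 + 1)) (grid, value)
  -- for i in range(len(grid) - 2): grid[-1].insert(0, value)
  let st := (PySem.List.pyRange 0 ((st.1.length : Int) - 2) 1).foldl
      (fun st _ => (st.1.modify (st.1.length - 1) (fun r => st.2 :: r), st.2 + 1)) st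
  -- for row in range(len(grid)-1, -1, -1): grid[row].insert(0, value)
  let st := (PySem.List.pyRange ((st.1.length : Int) - 1) (-1) (-1)).foldl
      (fun st row => (st.1.modify row.toNat (fun r => st.2 :: r), st.2 + 1)) st
  -- for i in range(len(grid) - 1): grid[0].append(value)
  let st := (PySem.List.pyRange 0 ((st.1.length : Int) - 1) 1).foldl
      (fun st _ => (st.1.modify 0 (fun r => r ++ [st.2]), st.2 + 1)) st
  st.1

-- ===== PORT B =====
def new_ring_alt (g : List (List Int)) : List (List Int) :=
  let v : Int := (PySem.List.pyGet? ((PySem.List.pyGet? g 0).getD []) (-1)).getD 0 + 1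
  let n : Int := g.length
  let top := PySem.List.pyRange (v + 3*n + 2) (v + 4*n + 4) 1
  let bottom := PySem.List.pyRange (v + 2*n + 1) (v + n - 1) (-1)
  let mid := (PySem.List.enumerate g 0).map (fun p => (v + 3*n + 1 - p.1) :: p.2 ++ [v + p.1])
  [top] ++ mid ++ [bottom]

-- ===== PRECONDITION & SPEC =====
-- Pre_ excludes exactly the inputs where Python A raises IndexError: g == [] or g[0] == [].
def Pre_new_ring (g : List (List Int)) : Prop := g ≠ [] ∧ g.headI ≠ []
instance (g : List (List Int)) : Decidable (Pre_new_ring g) := by unfold Pre_new_ring; infer_instance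
def pvWitness_new_ring : List (List Int) := [[1]]
def Spec_new_ring (g : List (List Int)) (out : List (List Int)) : Prop := out = new_ring_alt g
instance (g : List (List Int)) (out : List (List Int)) : Decidable (Spec_new_ring g out) := by unfold Spec_new_ring; infer_instance

-- ===== CLAIM (what is proved, stated in full; the proofs are below) =====
def Claim_equal_new_ring : Prop := ∀ (g : List (List Int)), Dom_new_ring g → Pre_new_ring g → Spec_new_ring g (new_ring g)

-- ===== LEMMAS AND PROOFS =====

theorem modify_append_cons {a : Type} (pre : List a) (r : a) (suf : List a) (f : a -> a) :
    (pre ++ r :: suf).modify pre.length f = pre ++ f r :: suf := by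
  induction pre with
  | nil => simp [List.modify]
  | cons x t ih => simpa [List.modify] using ih

theorem pyRange_neg_one_snoc (a b : Int) (h : b <= a) :
    PySem.List.pyRange a b (-1) ++ [b] = PySem.List.pyRange a (b - 1) (-1) := by
  rw [PySem.List.pyRange_neg_one_eq_reverse, PySem.List.pyRange_neg_one_eq_reverse,
    show b - 1 + 1 = b by ring, ← List.reverse_cons,
    ← PySem.List.pyRange_one_cons (by omega : b < a + 1)]

theorem copy_inner (row : List Int) (acc : List (List Int)) (r : List Int) :
    row.foldl (fun grid val => grid.modify (grid.length - 1) (fun l => l ++ [val])) (acc ++ [r])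
      = acc ++ [r ++ row] := by
  induction row generalizing r with
  | nil => simp
  | cons v t ih =>
    have h : (acc ++ [r]).modify ((acc ++ [r]).length - 1) (fun l => l ++ [v]) = acc ++ [r ++ [v]] := by
      simpa using modify_append_cons acc r [] (fun l => l ++ [v])
    simp only [List.foldl_cons, h]
    simpa using ih (r ++ [v])

theorem copy_outer (g acc : List (List Int)) :
    g.foldl (fun grid row =>
        row.foldl (fun grid val => grid.modify (grid.length - 1) (fun l => l ++ [val])) (grid ++ [[]])) acc
      = acc ++ g := by
  induction g generalizing acc with
  | nil => simp
  | cons r t ih =>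
    simp only [List.foldl_cons]
    rw [copy_inner r acc [], ih]
    simp

theorem loop1 (rest : List (List Int)) (pre : List (List Int)) (v a : Int) (ha : a = (pre.length : Int)) :
    (PySem.List.pyRange a (a + rest.length) 1).foldl
        (fun st (row : Int) => (st.1.modify row.toNat (fun r => r ++ [st.2]), st.2 + 1)) (pre ++ rest, v)
      = (pre ++ List.zipWith (fun r x => r ++ [x]) rest (PySem.List.pyRange v (v + rest.length) 1), v + rest.length) := by
  induction rest generalizing pre v a with
  | nil => simp [PySem.List.pyRange_one_eq_nil]
  | cons r t ih =>
    have hc : ((r :: t).length : Int) = (t.length : Int) + 1 := by simp only [List.length_cons]; push_cast; ring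
    rw [PySem.List.pyRange_one_cons (by rw [hc]; omega : a < a + ((r :: t).length : Int)),
        PySem.List.pyRange_one_cons (by rw [hc]; omega : v < v + ((r :: t).length : Int))]
    simp only [List.foldl_cons, List.zipWith_cons_cons]
    have htn : a.toNat = pre.length := by omega
    rw [htn, modify_append_cons pre r t (fun l => l ++ [v])]
    rw [show a + ((r :: t).length : Int) = (a + 1) + (t.length : Int) by rw [hc]; ring,
        show v + ((r :: t).length : Int) = (v + 1) + (t.length : Int) by rw [hc]; ring]
    have := ih (pre ++ [r ++ [v]]) (v + 1) (a + 1)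
      (by rw [ha]; simp only [List.length_append, List.length_cons, List.length_nil]; push_cast; ring)
    rw [show pre ++ (r ++ [v]) :: t = (pre ++ [r ++ [v]]) ++ t by simp, this]
    simp [List.append_assoc]

theorem loop2 (l : List Int) (pre : List (List Int)) (last : List Int) (v : Int) :
    l.foldl (fun st (_ : Int) => (st.1.modify (st.1.length - 1) (fun r => st.2 :: r), st.2 + 1)) (pre ++ [last], v)
      = (pre ++ [PySem.List.pyRange (v + l.length - 1) (v - 1) (-1) ++ last], v + l.length) := by
  induction l generalizing last v with
  | nil => simp [PySem.List.pyRange_neg_one_eq_nil (by omega : v - 1 <= v - 1)]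
  | cons x t ih =>
    have hc : ((x :: t).length : Int) = (t.length : Int) + 1 := by simp only [List.length_cons]; push_cast; ring
    simp only [List.foldl_cons]
    have h : (pre ++ [last]).modify ((pre ++ [last]).length - 1) (fun r => v :: r) = pre ++ [v :: last] := by
      simpa using modify_append_cons pre last [] (fun r => v :: r)
    rw [h, ih (v :: last) (v + 1)]
    have hr : PySem.List.pyRange (v + 1 + (t.length : Int) - 1) (v + 1 - 1) (-1) ++ v :: last
        = PySem.List.pyRange (v + ((x :: t).length : Int) - 1) (v - 1) (-1) ++ last := by
      rw [show (PySem.List.pyRange (v + 1 + (t.length : Int) - 1) (v + 1 - 1) (-1)) ++ v :: last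
            = ((PySem.List.pyRange (v + 1 + (t.length : Int) - 1) (v + 1 - 1) (-1)) ++ [v]) ++ last by simp,
          show v + 1 - 1 = v by ring, pyRange_neg_one_snoc _ _ (by omega)]
      rw [show v - 1 = v - 1 from rfl, show v + 1 + (t.length : Int) - 1 = v + ((x :: t).length : Int) - 1 by rw [hc]; ring]
    rw [hr]
    rw [show v + 1 + (t.length : Int) = v + ((x :: t).length : Int) by rw [hc]; ring]

theorem loop4 (l : List Int) (first : List Int) (suf : List (List Int)) (v : Int) :
    l.foldl (fun st (_ : Int) => (st.1.modify 0 (fun r => r ++ [st.2]), st.2 + 1)) (first :: suf, v)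
      = ((first ++ PySem.List.pyRange v (v + l.length) 1) :: suf, v + l.length) := by
  induction l generalizing first v with
  | nil => simp [PySem.List.pyRange_one_eq_nil]
  | cons x t ih =>
    have hc : ((x :: t).length : Int) = (t.length : Int) + 1 := by simp only [List.length_cons]; push_cast; ring
    simp only [List.foldl_cons]
    have h : (first :: suf).modify 0 (fun r => r ++ [v]) = (first ++ [v]) :: suf := by
      simp [List.modify]
    rw [h, ih (first ++ [v]) (v + 1)]
    rw [PySem.List.pyRange_one_cons (by rw [hc]; omega : v < v + ((x :: t).length : Int)),
        show v + ((x :: t).length : Int) = (v + 1) + (t.length : Int) by rw [hc]; ring]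
    simp [List.append_assoc]

theorem loop3 (gs suf : List (List Int)) (v a : Int) (ha : a = (gs.length : Int) - 1) :
    (PySem.List.pyRange a (-1) (-1)).foldl
        (fun st (row : Int) => (st.1.modify row.toNat (fun r => st.2 :: r), st.2 + 1)) (gs ++ suf, v)
      = (List.zipWith (fun x r => x :: r) (PySem.List.pyRange (v + gs.length - 1) (v - 1) (-1)) gs ++ suf, v + gs.length) := by
  induction gs using List.reverseRecOn generalizing suf v a with
  | nil =>
    simp at ha
    subst ha
    simp [PySem.List.pyRange_neg_one_eq_nil (by omega : (-1 : Int) <= -1),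
      PySem.List.pyRange_neg_one_eq_nil (by omega : (v : Int) - 1 <= v - 1)]
  | append_singleton gs' r ih =>
    have hlen : ((gs' ++ [r]).length : Int) = (gs'.length : Int) + 1 := by
      simp only [List.length_append, List.length_cons, List.length_nil]; push_cast; ring
    rw [PySem.List.pyRange_neg_one_cons (by omega : (-1 : Int) < a)]
    simp only [List.foldl_cons]
    have htn : a.toNat = gs'.length := by omega
    rw [show (gs' ++ [r]) ++ suf = gs' ++ r :: suf by simp, htn,
        modify_append_cons gs' r suf (fun l => v :: l)]
    rw [show gs' ++ (v :: r) :: suf = gs' ++ ((v :: r) :: suf) from rfl,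
        ih ((v :: r) :: suf) (v + 1) (a - 1) (by omega)]
    have hrange : PySem.List.pyRange (v + ((gs' ++ [r]).length : Int) - 1) (v - 1) (-1)
        = PySem.List.pyRange (v + 1 + (gs'.length : Int) - 1) v (-1) ++ [v] := by
      rw [pyRange_neg_one_snoc _ _ (by omega), show (v : Int) - 1 = v - 1 from rfl]
      rw [show v + ((gs' ++ [r]).length : Int) - 1 = v + 1 + (gs'.length : Int) - 1 by rw [hlen]; ring]
    rw [hrange, List.zipWith_append (by
      simp only [PySem.List.length_pyRange_neg_one]; omega)]
    rw [show v + 1 + (gs'.length : Int) = v + ((gs' ++ [r]).length : Int) by rw [hlen]; ring]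
    simp

theorem loop3' (gs : List (List Int)) (v a : Int) (ha : a = (gs.length : Int) - 1) :
    (PySem.List.pyRange a (-1) (-1)).foldl
        (fun st (row : Int) => (st.1.modify row.toNat (fun r => st.2 :: r), st.2 + 1)) (gs, v)
      = (List.zipWith (fun x r => x :: r) (PySem.List.pyRange (v + gs.length - 1) (v - 1) (-1)) gs, v + gs.length) := by
  simpa using loop3 gs [] v a ha

theorem zip_enum (g : List (List Int)) (s a b : Int) :
    List.zipWith (fun x r => x :: r) (PySem.List.pyRange a (a - g.length) (-1))
        (List.zipWith (fun r x => r ++ [x]) g (PySem.List.pyRange b (b + g.length) 1))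
      = (PySem.List.enumerate g s).map (fun p => (a + s - p.1) :: p.2 ++ [b - s + p.1]) := by
  induction g generalizing s a b with
  | nil => simp [PySem.List.pyRange_neg_one_eq_nil, PySem.List.pyRange_one_eq_nil, PySem.List.enumerate_nil]
  | cons r t ih =>
    have hc : ((r :: t).length : Int) = (t.length : Int) + 1 := by simp only [List.length_cons]; push_cast; ring
    rw [PySem.List.pyRange_neg_one_cons (by rw [hc]; omega : a - ((r :: t).length : Int) < a),
        PySem.List.pyRange_one_cons (by rw [hc]; omega : b < b + ((r :: t).length : Int)),
        PySem.List.enumerate_cons]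
    simp only [List.zipWith_cons_cons, List.map_cons]
    rw [show a - ((r :: t).length : Int) = (a - 1) - (t.length : Int) by rw [hc]; ring,
        show b + ((r :: t).length : Int) = (b + 1) + (t.length : Int) by rw [hc]; ring,
        ih (s + 1) (a - 1) (b + 1)]
    have hf : ∀ p : Int × List Int,
        (((a - 1) + (s + 1) - p.1 : Int) :: p.2 ++ [(b + 1) - (s + 1) + p.1])
          = ((a + s - p.1 : Int) :: p.2 ++ [b - s + p.1]) := by
      intro p
      rw [show (a - 1) + (s + 1) - p.1 = a + s - p.1 by ring, show (b + 1) - (s + 1) + p.1 = b - s + p.1 by ring]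
    simp only [hf]
    rw [show a + s - s = a by ring, show b - s + s = b by ring]
    simp

theorem new_ring_eq_alt (g : List (List Int)) : new_ring g = new_ring_alt g := by
  unfold new_ring new_ring_alt
  generalize (PySem.List.pyGet? ((PySem.List.pyGet? g 0).getD []) (-1)).getD 0 + 1 = v
  rw [copy_outer g []]
  simp only [List.nil_append]
  rw [show ([] : List Int) :: g ++ [[]] = [([] : List Int)] ++ (g ++ [[]]) from rfl]
  have hL : ((([([] : List Int)] ++ (g ++ [[]])).length : Int)) = 1 + ((g ++ [[]]).length : Int) := by
    simp only [List.length_append, List.length_cons, List.length_nil]; push_cast; ring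
  rw [hL, loop1 (g ++ [[]]) [[]] v 1 (by simp)]
  simp only []
  have hlen1 : ((g ++ [[]]).length : Int) = (g.length : Int) + 1 := by
    simp only [List.length_append, List.length_cons, List.length_nil]; push_cast; ring
  rw [hlen1, show v + ((g.length : Int) + 1) = (v + (g.length : Int)) + 1 by ring,
      PySem.List.pyRange_one_succ_right (by omega : v <= v + (g.length : Int)),
      List.zipWith_append (by simp only [PySem.List.length_pyRange_one]; omega)]
  simp only [List.zipWith_cons_cons, List.zipWith_nil_left, List.nil_append]
  have hZlen : (List.zipWith (fun r x => r ++ [x]) g (PySem.List.pyRange v (v + (g.length : Int)) 1)).length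
      = g.length := by
    simp only [List.length_zipWith, PySem.List.length_pyRange_one]; omega
  have hb2 : (([[]] ++ (List.zipWith (fun r x => r ++ [x]) g (PySem.List.pyRange v (v + (g.length : Int)) 1)
      ++ [[v + (g.length : Int)]])).length : Int) - 2 = (g.length : Int) := by
    simp only [List.length_append, List.length_cons, List.length_nil, hZlen]; push_cast; ring
  rw [hb2,
      show ([([] : List Int)] ++ (List.zipWith (fun r x => r ++ [x]) g (PySem.List.pyRange v (v + (g.length : Int)) 1)
        ++ [[v + (g.length : Int)]]))
        = (([] : List Int) :: List.zipWith (fun r x => r ++ [x]) g (PySem.List.pyRange v (v + (g.length : Int)) 1))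
          ++ [[v + (g.length : Int)]] by simp,
      loop2 (PySem.List.pyRange 0 (g.length : Int) 1) _ _ _]
  simp only []
  have hrl : ((PySem.List.pyRange 0 (g.length : Int) 1).length : Int) = (g.length : Int) := by
    simp only [PySem.List.length_pyRange_one]; omega
  rw [hrl,
      show v + (g.length : Int) + 1 + (g.length : Int) - 1 = v + 2*(g.length : Int) by ring,
      show v + (g.length : Int) + 1 - 1 = v + (g.length : Int) by ring,
      pyRange_neg_one_snoc (v + 2*(g.length : Int)) (v + (g.length : Int)) (by omega),
      show v + (g.length : Int) + 1 + (g.length : Int) = v + 2*(g.length : Int) + 1 by ring]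
  have hb3 : ((( ([] : List Int) :: List.zipWith (fun r x => r ++ [x]) g (PySem.List.pyRange v (v + (g.length : Int)) 1) ++
      [PySem.List.pyRange (v + 2 * (g.length : Int)) (v + (g.length : Int) - 1) (-1)]).length : Int)) - 1
      = (g.length : Int) + 1 := by
    simp only [List.length_cons, List.length_append, List.length_nil, hZlen]; push_cast; ring
  rw [hb3, loop3' _ _ _ (by
    simp only [List.length_cons, List.length_append, List.length_nil, hZlen]; push_cast; ring)]
  simp only []
  have hg2 : ((( ([] : List Int) :: List.zipWith (fun r x => r ++ [x]) g (PySem.List.pyRange v (v + (g.length : Int)) 1) ++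
      [PySem.List.pyRange (v + 2 * (g.length : Int)) (v + (g.length : Int) - 1) (-1)]).length : Int)) = (g.length : Int) + 2 := by
    simp only [List.length_cons, List.length_append, List.length_nil, hZlen]; push_cast; ring
  rw [hg2,
      show v + 2*(g.length : Int) + 1 + ((g.length : Int) + 2) - 1 = v + 3*(g.length : Int) + 2 by ring,
      show v + 2*(g.length : Int) + 1 - 1 = v + 2*(g.length : Int) by ring,
      show v + 2*(g.length : Int) + 1 + ((g.length : Int) + 2) = v + 3*(g.length : Int) + 3 by ring,
      PySem.List.pyRange_neg_one_cons (by omega : v + 2*(g.length : Int) < v + 3*(g.length : Int) + 2),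
      show v + 3*(g.length : Int) + 2 - 1 = v + 3*(g.length : Int) + 1 by ring]
  have hsplit : PySem.List.pyRange (v + 3*(g.length : Int) + 1) (v + 2*(g.length : Int)) (-1)
      = PySem.List.pyRange (v + 3*(g.length : Int) + 1) (v + 2*(g.length : Int) + 1) (-1) ++ [v + 2*(g.length : Int) + 1] := by
    rw [pyRange_neg_one_snoc _ _ (by omega)]
    congr 1
    ring
  rw [hsplit]
  rw [show (([] : List Int) :: List.zipWith (fun r x => r ++ [x]) g (PySem.List.pyRange v (v + (g.length : Int)) 1)) ++ [PySem.List.pyRange (v + 2*(g.length : Int)) (v + (g.length : Int) - 1) (-1)]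
        = ([] : List Int) :: (List.zipWith (fun r x => r ++ [x]) g (PySem.List.pyRange v (v + (g.length : Int)) 1) ++ [PySem.List.pyRange (v + 2*(g.length : Int)) (v + (g.length : Int) - 1) (-1)]) from rfl]
  simp only [List.zipWith_cons_cons]
  rw [List.zipWith_append (by simp only [PySem.List.length_pyRange_neg_one, hZlen]; omega)]
  simp only [List.zipWith_cons_cons, List.zipWith_nil_right]
  have hcons : (v + 2*(g.length : Int) + 1) :: PySem.List.pyRange (v + 2*(g.length : Int)) (v + (g.length : Int) - 1) (-1)
      = PySem.List.pyRange (v + 2*(g.length : Int) + 1) (v + (g.length : Int) - 1) (-1) := by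
    rw [PySem.List.pyRange_neg_one_cons
          (by omega : v + (g.length : Int) - 1 < v + 2*(g.length : Int) + 1),
        show v + 2*(g.length : Int) + 1 - 1 = v + 2*(g.length : Int) by ring]
  rw [hcons]
  have hb4 : ((([v + 3*(g.length : Int) + 2] :: (List.zipWith (fun x r => x :: r) (PySem.List.pyRange (v + 3*(g.length : Int) + 1) (v + 2*(g.length : Int) + 1) (-1)) (List.zipWith (fun r x => r ++ [x]) g (PySem.List.pyRange v (v + (g.length : Int)) 1)) ++ [PySem.List.pyRange (v + 2*(g.length : Int) + 1) (v + (g.length : Int) - 1) (-1)])).length : Int)) - 1 = (g.length : Int) + 1 := by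
    simp only [List.length_cons, List.length_append, List.length_nil, List.length_zipWith,
      PySem.List.length_pyRange_neg_one, hZlen]
    omega
  rw [hb4, loop4 (PySem.List.pyRange 0 ((g.length : Int) + 1) 1) _ _ _]
  simp only []
  have hrl2 : ((PySem.List.pyRange 0 ((g.length : Int) + 1) 1).length : Int) = (g.length : Int) + 1 := by
    simp only [PySem.List.length_pyRange_one]; omega
  rw [hrl2, show v + 3*(g.length : Int) + 3 + ((g.length : Int) + 1) = v + 4*(g.length : Int) + 4 by ring]
  have htop : [v + 3*(g.length : Int) + 2] ++ PySem.List.pyRange (v + 3*(g.length : Int) + 3) (v + 4*(g.length : Int) + 4) 1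
      = PySem.List.pyRange (v + 3*(g.length : Int) + 2) (v + 4*(g.length : Int) + 4) 1 := by
    rw [PySem.List.pyRange_one_cons
          (by omega : v + 3*(g.length : Int) + 2 < v + 4*(g.length : Int) + 4),
        show v + 3*(g.length : Int) + 2 + 1 = v + 3*(g.length : Int) + 3 by ring]
    rfl
  rw [htop]
  have hM := zip_enum g 0 (v + 3*(g.length : Int) + 1) v
  rw [show v + 3*(g.length : Int) + 1 - (g.length : Int) = v + 2*(g.length : Int) + 1 by ring] at hM
  simp only [add_zero, sub_zero] at hM
  rw [hM]
  simp

-- ===== VERDICT (by name: the statement is the Claim_ definition above) =====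
theorem new_ring_spec : Claim_equal_new_ring := by
  intro g _ _
  unfold Spec_new_ring
  exact new_ring_eq_alt g
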